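-- pv_equiv track=rewrite | github.com/hwistlezz/baekjoon | Python/B_17140_이차원 배열과 연산.py | operate_R
-- ===== SOURCE A (Python) =====
-- def sort_line(line):
--     # 1) 0 제거
--     line = [x for x in line if x != 0]
--
--     # 2) 숫자 개수 세기
--     cnt = {}
--     for x in line:
--         cnt[x] = cnt.get(x, 0) + 1
--
--     # 3) 정렬용 리스트 만들기 -> (숫자, 개수) -> 1. 개수 오름차순  2. 숫자 오름차순
--     pairs = list(cnt.items())  # [(숫자, 개수), (숫자, 개수), ...]
--     pairs.sort(key=lambda x : (x[1], x[0]))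
--
--     # 4) 다시 펼치기
--     new_line = []
--     for num, count in pairs:
--         new_line.append(num)
--         new_line.append(count)
--
--     return new_line
--
-- def operate_R(arr):
--     new_A = []
--     max_len = 0
--
--     for row in arr:
--         new_row = sort_line(row)[:100]
--         new_A.append(new_row)
--         max_len = max(max_len, len(new_row))
--
--     for row in new_A:
--         row += [0] * (max_len - len(row))
--
--     return new_A
-- ===== SOURCE B (Python) =====
-- def sort_line(line):
--     nz = sorted(x for x in line if x != 0)
--     pairs = []
--     for v in nz:
--         if pairs and pairs[-1][0] == v:
--             pairs[-1] = (v, pairs[-1][1] + 1)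
--         else:
--             pairs.append((v, 1))
--     pairs.sort(key=lambda p: (p[1], p[0]))
--     return [x for p in pairs for x in p]
--
-- def operate_R(arr):
--     rows = [sort_line(row)[:100] for row in arr]
--     width = max(map(len, rows), default=0)
--     return [r + [0] * (width - len(r)) for r in rows]
-- ===== Notes on version B (the rewrite author's own statement) =====
-- stated objective: alternative
-- what changed: sort_line builds its (value,count) pairs by sorting the non-zero values and grouping consecutive runs instead of counting into a dict, and operate_R becomes comprehensions with max(..., default=0) instead of an accumulator loop with a running max and in-place padding.
import Mathlib
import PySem

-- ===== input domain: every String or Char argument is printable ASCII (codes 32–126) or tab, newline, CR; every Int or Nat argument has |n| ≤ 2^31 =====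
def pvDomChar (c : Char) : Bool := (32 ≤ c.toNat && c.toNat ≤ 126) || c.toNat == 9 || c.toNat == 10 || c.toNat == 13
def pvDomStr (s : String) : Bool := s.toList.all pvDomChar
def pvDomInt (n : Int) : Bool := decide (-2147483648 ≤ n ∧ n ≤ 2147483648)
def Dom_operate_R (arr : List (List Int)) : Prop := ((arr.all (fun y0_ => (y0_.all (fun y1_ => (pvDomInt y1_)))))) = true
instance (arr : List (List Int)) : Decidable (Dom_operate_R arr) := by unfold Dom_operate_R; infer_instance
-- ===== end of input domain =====

-- B builds sort_line's (value,count) pairs by sorting the non-zero values and grouping consecutive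
-- runs instead of dict counting, and replaces operate_R's accumulator/running-max loop with
-- comprehensions plus max(..., default=0): an alternative decomposition, not claimed faster.


-- ===== PORT A =====
-- sort_line of Source A: filter zeros, count with a dict, sort (count, value), flatten
def sortLineA (line : List Int) : List Int :=
  let line := line.filter (fun x => x != 0)
  let cnt := line.foldl (fun d x => d.insert x (d.getD x 0 + 1)) PySem.Dict.empty
  let pairs := cnt.items
  let pairs := PySem.List.sorted2 pairs (fun p => p.2) (fun p => p.1)
  pairs.foldl (fun nl p => nl ++ [p.1] ++ [p.2]) []

def operate_R (arr : List (List Int)) : List (List Int) :=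
  let st := arr.foldl (fun (s : List (List Int) × Int) row =>
    let newRow := PySem.List.slice (sortLineA row) none (some 100)
    (s.1 ++ [newRow], max s.2 (PySem.List.len newRow))) ([], 0)
  st.1.map (fun row => row ++ PySem.List.pyRepeat [0] (st.2 - PySem.List.len row))

-- ===== PORT B =====
-- one step of Source B's grouping loop over the sorted non-zero values
def groupStep (ps : List (Int × Int)) (v : Int) : List (Int × Int) :=
  match ps.getLast? with
  | some p => if p.1 = v then ps.dropLast ++ [(v, p.2 + 1)] else ps ++ [(v, 1)]
  | none => ps ++ [(v, 1)]

-- sort_line of Source B: sort the non-zero values, group consecutive runs, sort (count, value), flatten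
def sortLineB (line : List Int) : List Int :=
  let nz := PySem.List.sorted (line.filter (fun x => x != 0)) (fun x => x)
  let pairs := nz.foldl groupStep []
  let pairs := PySem.List.sorted2 pairs (fun p => p.2) (fun p => p.1)
  pairs.flatMap (fun p => [p.1, p.2])

def operate_R_alt (arr : List (List Int)) : List (List Int) :=
  let rows := arr.map (fun row => PySem.List.slice (sortLineB row) none (some 100))
  let width := PySem.List.maxD (rows.map PySem.List.len) (fun x => x) 0
  rows.map (fun r => r ++ PySem.List.pyRepeat [0] (width - PySem.List.len r))

-- ===== PRECONDITION & SPEC =====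
def Spec_operate_R (arr : List (List Int)) (out : List (List Int)) : Prop := out = operate_R_alt arr
instance (arr : List (List Int)) (out : List (List Int)) : Decidable (Spec_operate_R arr out) := by unfold Spec_operate_R; infer_instance

-- ===== CLAIM (what is proved, stated in full; the proofs are below) =====
def Claim_equal_operate_R : Prop := ∀ (arr : List (List Int)), Dom_operate_R arr → Spec_operate_R arr (operate_R arr)

-- ===== LEMMAS AND PROOFS =====

-- the lexicographic (count, value) order the final sort establishes
def lexLe (p q : Int × Int) : Prop := p.2 < q.2 ∨ (p.2 = q.2 ∧ p.1 ≤ q.1)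

lemma lexLe_total (p q : Int × Int) : lexLe p q ∨ lexLe q p := by
  unfold lexLe; omega

lemma lexLe_antisymm {p q : Int × Int} (h1 : lexLe p q) (h2 : lexLe q p) : p = q := by
  unfold lexLe at *
  have : p.1 = q.1 ∧ p.2 = q.2 := by omega
  exact Prod.ext this.1 this.2

-- the Bool comparator sorted2 uses, on our keys
def cmp2 (a b : Int × Int) : Bool :=
  decide (a.2 < b.2) || (!decide (b.2 < a.2) && decide (a.1 < b.1))

lemma cmp2_true {a b : Int × Int} (h : cmp2 a b = true) : lexLe a b := by
  unfold cmp2 at h; unfold lexLe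
  simp only [Bool.or_eq_true, Bool.and_eq_true, Bool.not_eq_true', decide_eq_true_eq,
    decide_eq_false_iff_not] at h
  omega

lemma cmp2_false {a b : Int × Int} (h : cmp2 a b = false) : lexLe b a := by
  unfold cmp2 at h; unfold lexLe
  simp only [Bool.or_eq_false_iff, Bool.and_eq_false_iff, Bool.not_eq_false', decide_eq_true_eq,
    decide_eq_false_iff_not] at h
  omega

lemma insertBy_cmp2_pairwise (x : Int × Int) (acc : List (Int × Int))
    (h : acc.Pairwise lexLe) : (PySem.List.insertBy cmp2 x acc).Pairwise lexLe := by
  induction acc with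
  | nil => simp [PySem.List.insertBy]
  | cons y ys ih =>
    rcases h with _ | ⟨hy, hys⟩
    by_cases hc : cmp2 x y = true
    · simp only [PySem.List.insertBy, hc, if_true]
      constructor
      · intro z hz
        rcases List.mem_cons.mp hz with rfl | hz
        · exact cmp2_true hc
        · rcases lexLe_total x z with h' | h'
          · exact h'
          · -- z ∈ ys, y lexLe z; x lexLe y by hc; transitivity gives x lexLe z anyway
            have := hy z hz
            have := cmp2_true hc
            unfold lexLe at *; omega
      · exact List.Pairwise.cons hy hys
    · rw [Bool.not_eq_true] at hc
      simp only [PySem.List.insertBy, hc]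
      constructor
      · intro z hz
        rw [PySem.List.mem_insertBy] at hz
        rcases hz with rfl | hz
        · exact cmp2_false hc
        · exact hy z hz
      · exact ih hys

lemma sorted2_eq_foldl (xs : List (Int × Int)) :
    PySem.List.sorted2 xs (fun p => p.2) (fun p => p.1)
      = xs.foldl (fun acc x => PySem.List.insertBy cmp2 x acc) [] := rfl

lemma foldl_insertBy_pairwise (xs acc : List (Int × Int)) (h : acc.Pairwise lexLe) :
    (xs.foldl (fun acc x => PySem.List.insertBy cmp2 x acc) acc).Pairwise lexLe := by
  induction xs generalizing acc with
  | nil => exact h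
  | cons x xs ih => exact ih _ (insertBy_cmp2_pairwise x acc h)

lemma sorted2_pairwise_lexLe (xs : List (Int × Int)) :
    (PySem.List.sorted2 xs (fun p => p.2) (fun p => p.1)).Pairwise lexLe := by
  rw [sorted2_eq_foldl]; exact foldl_insertBy_pairwise xs [] (by simp)

-- sorted2 with the (count, value) key returns the same list on any two permuted inputs
lemma sorted2_eq_of_perm {xs ys : List (Int × Int)} (h : xs.Perm ys) :
    PySem.List.sorted2 xs (fun p => p.2) (fun p => p.1)
      = PySem.List.sorted2 ys (fun p => p.2) (fun p => p.1) := by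
  apply List.Perm.eq_of_pairwise (le := lexLe)
  · intro a b _ _ h1 h2; exact lexLe_antisymm h1 h2
  · exact sorted2_pairwise_lexLe xs
  · exact sorted2_pairwise_lexLe ys
  · exact ((PySem.List.sorted2_perm xs _ _ _).trans h).trans
      (PySem.List.sorted2_perm ys _ _ _).symm

-- Set.ofList is a sublist of its input
lemma ofList_sublist (xs : List Int) : (PySem.Set.ofList xs).Sublist xs := by
  induction xs using List.reverseRecOn with
  | nil => simp [PySem.Set.ofList_eq_foldl]
  | append_singleton xs v ih =>
    rw [PySem.Set.ofList_eq_foldl] at *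
    rw [List.foldl_append, List.foldl_cons, List.foldl_nil]
    unfold PySem.Set.add
    split
    · exact ih.trans (List.sublist_append_left xs [v])
    · exact List.Sublist.append ih (List.Sublist.refl [v])

lemma ofList_pairwise_lt {xs : List Int} (h : xs.Pairwise (· ≤ ·)) :
    (PySem.Set.ofList xs).Pairwise (· < ·) := by
  have h1 : (PySem.Set.ofList xs).Pairwise (· ≤ ·) := h.sublist (ofList_sublist xs)
  have h2 : (PySem.Set.ofList xs).Nodup := PySem.Set.nodup_ofList xs
  have := h1.and h2
  exact this.imp (fun {a b} hab => lt_of_le_of_ne hab.1 hab.2)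

-- in a strictly increasing list, a member that dominates every member is the last element
lemma getLast?_of_max {s : List Int} (hs : s.Pairwise (· < ·)) {v : Int}
    (hv : v ∈ s) (hmax : ∀ x ∈ s, x ≤ v) : s.getLast? = some v := by
  induction s with
  | nil => cases hv
  | cons a t ih =>
    cases t with
    | nil =>
      have : v = a := by simpa using hv
      simp [this]
    | cons b u =>
      rcases hs with _ | ⟨ha, ht⟩
      have hvt : v ∈ b :: u := by
        rcases List.mem_cons.mp hv with rfl | hvt
        · exact absurd (ha b (by simp)) (by have := hmax b (by simp); omega)
        · exact hvt
      rw [List.getLast?_cons_cons]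
      exact ih ht hvt (fun x hx => hmax x (List.mem_cons_of_mem a hx))

-- grouping consecutive runs of a (≤)-sorted list yields each distinct value with its count
lemma group_spec (ws : List Int) (h : ws.Pairwise (· ≤ ·)) :
    ws.foldl groupStep [] = (PySem.Set.ofList ws).map (fun k => (k, (ws.count k : Int))) := by
  induction ws using List.reverseRecOn with
  | nil => simp [PySem.Set.ofList_eq_foldl]
  | append_singleton ws v ih =>
    have hws : ws.Pairwise (· ≤ ·) := h.sublist (List.sublist_append_left ws [v])
    have hle : ∀ x ∈ ws, x ≤ v := by
      intro x hx
      exact List.pairwise_append.mp h |>.2.2 x hx v (by simp)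
    have hnd : (PySem.Set.ofList ws).Nodup := PySem.Set.nodup_ofList ws
    have hfold : PySem.Set.ofList (ws ++ [v]) = PySem.Set.add (PySem.Set.ofList ws) v := by
      rw [PySem.Set.ofList_eq_foldl, List.foldl_append, ← PySem.Set.ofList_eq_foldl,
        List.foldl_cons, List.foldl_nil]
    rw [List.foldl_append, List.foldl_cons, List.foldl_nil, ih hws]
    by_cases hv : v ∈ ws
    · -- bump the last pair
      have hlast : (PySem.Set.ofList ws).getLast? = some v :=
        getLast?_of_max (ofList_pairwise_lt hws)
          ((PySem.Set.mem_ofList ws v).mpr hv)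
          (fun x hx => hle x ((PySem.Set.mem_ofList ws x).mp hx))
      have hset : PySem.Set.ofList (ws ++ [v]) = PySem.Set.ofList ws := by
        rw [hfold]
        exact PySem.Set.add_of_mem ((PySem.Set.mem_ofList ws v).mpr hv)
      obtain ⟨l', hdec⟩ := List.getLast?_eq_some_iff.mp hlast
      have hkv : ∀ k ∈ l', k ≠ v := by
        intro k hk h'
        have hnd' := hnd
        rw [hdec, List.nodup_append] at hnd'
        exact hnd'.2.2 k hk v (List.mem_singleton.mpr rfl) h'
      unfold groupStep
      rw [List.getLast?_map, hlast]
      simp only [Option.map_some]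
      rw [hset, hdec]
      simp only [List.map_append, List.map_cons, List.map_nil, List.dropLast_concat]
      rw [if_pos trivial]
      congr 1
      · apply List.map_congr_left
        intro k hk
        have h0 : List.count k [v] = 0 :=
          List.count_eq_zero.mpr (by simp [hkv k hk])
        have hc : (ws ++ [v]).count k = ws.count k := by
          simp [List.count_append, h0]
        simp [hc]
      · have hc : (ws ++ [v]).count v = ws.count v + 1 := by
          simp [List.count_append]
        simp [hc]
    · -- fresh value appended
      have hnotin : v ∉ PySem.Set.ofList ws := fun hc => hv ((PySem.Set.mem_ofList ws v).mp hc)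
      have hset : PySem.Set.ofList (ws ++ [v]) = PySem.Set.ofList ws ++ [v] := by
        rw [hfold]
        exact PySem.Set.add_of_not_mem hnotin
      have hbranch : ∀ p ∈ ((PySem.Set.ofList ws).map
          (fun k => (k, (ws.count k : Int)))).getLast?, p.1 ≠ v := by
        intro p hp
        rw [List.getLast?_map] at hp
        simp only [Option.mem_def, Option.map_eq_some_iff] at hp
        obtain ⟨k, hk, rfl⟩ := hp
        have hkmem : k ∈ PySem.Set.ofList ws := List.mem_of_getLast? hk
        intro h'; exact hnotin (h' ▸ hkmem)
      have hcongr : (PySem.Set.ofList ws).map (fun k => (k, (ws.count k : Int)))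
          = (PySem.Set.ofList ws).map (fun k => (k, ((ws ++ [v]).count k : Int))) := by
        apply List.map_congr_left
        intro k hk
        have hkv : k ≠ v := fun h' => hnotin (h' ▸ hk)
        have h0 : List.count k [v] = 0 :=
          List.count_eq_zero.mpr (by simp [hkv])
        have hc : (ws ++ [v]).count k = ws.count k := by
          simp [List.count_append, h0]
        simp [hc]
      have hvcnt : ((ws ++ [v]).count v : Int) = 1 := by
        simp [List.count_append, List.count_eq_zero_of_not_mem hv]
      unfold groupStep
      cases hg : ((PySem.Set.ofList ws).map (fun k => (k, (ws.count k : Int)))).getLast? with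
      | none =>
        simp only
        rw [hset]
        simp only [List.map_append, List.map_cons, List.map_nil, hvcnt]
        rw [hcongr]
      | some p =>
        have hpv : p.1 ≠ v := hbranch p (by rw [hg]; rfl)
        simp only [if_neg hpv]
        rw [hset]
        simp only [List.map_append, List.map_cons, List.map_nil, hvcnt]
        rw [hcongr]

-- the two pair lists (A: dict items, B: grouped runs of the sorted list) are permutations
lemma pairs_perm (l : List Int) :
    ((PySem.List.sorted l (fun x => x)).foldl groupStep []).Perm
      ((PySem.Set.ofList l).map (fun k => (k, (l.count k : Int)))) := by
  set ws := PySem.List.sorted l (fun x => x) with hws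
  have hperm : ws.Perm l := PySem.List.sorted_perm l _ _
  have hpw : ws.Pairwise (· ≤ ·) := PySem.List.sorted_pairwise l _
  rw [group_spec ws hpw]
  have hcnt : ∀ k, ws.count k = l.count k := fun k => hperm.count_eq k
  have h1 : (PySem.Set.ofList ws).map (fun k => (k, (ws.count k : Int)))
      = (PySem.Set.ofList ws).map (fun k => (k, (l.count k : Int))) := by
    apply List.map_congr_left; intro k _; rw [hcnt k]
  rw [h1]
  apply List.Perm.map
  rw [List.perm_ext_iff_of_nodup (PySem.Set.nodup_ofList ws) (PySem.Set.nodup_ofList l)]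
  intro a
  rw [PySem.Set.mem_ofList, PySem.Set.mem_ofList]
  exact hperm.mem_iff

-- the two sort_line implementations agree
lemma sortLine_eq (line : List Int) : sortLineA line = sortLineB line := by
  unfold sortLineA sortLineB
  simp only []
  set l := line.filter (fun x => x != 0) with hl
  rw [PySem.Dict.foldl_insert_getD_add_one_eq_counter, PySem.Dict.items_counter]
  rw [sorted2_eq_of_perm (pairs_perm l).symm]
  have : ∀ (ps : List (Int × Int)),
      ps.foldl (fun nl p => nl ++ [p.1] ++ [p.2]) []
        = ps.flatMap (fun p => [p.1, p.2]) := by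
    intro ps
    have h1 : ps.foldl (fun nl p => nl ++ [p.1] ++ [p.2]) []
        = ps.foldl (fun nl p => nl ++ [p.1, p.2]) [] := by
      apply PySem.List.foldl_congr_mem
      intro acc x _
      simp
    rw [h1]
    have := PySem.List.foldl_append_eq_flatMap (fun p : Int × Int => [p.1, p.2]) ps []
    simpa using this
  rw [this]

-- nonneg running max equals maxD over the same list
lemma maxD_eq_foldl (xs : List Int) (h : ∀ x ∈ xs, 0 ≤ x) :
    PySem.List.maxD xs (fun x => x) 0 = xs.foldl max 0 := by
  cases xs with
  | nil => rfl
  | cons x t =>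
    unfold PySem.List.maxD
    rw [PySem.List.max?_id_cons]
    simp only [Option.getD_some, List.foldl_cons]
    have hx : 0 ≤ x := h x (by simp)
    rw [max_eq_right hx]

-- ===== VERDICT (by name: the statement is the Claim_ definition above) =====
theorem operate_R_spec : Claim_equal_operate_R := by
  intro arr _
  unfold Spec_operate_R operate_R operate_R_alt
  simp only [sortLine_eq]
  rw [PySem.List.foldl_prod_mk
    (f := fun acc row => acc ++ [PySem.List.slice (sortLineB row) none (some 100)])
    (g := fun m row => max m (PySem.List.len (PySem.List.slice (sortLineB row) none (some 100))))]
  rw [PySem.List.foldl_append_singleton_eq_map]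
  simp only [List.nil_append]
  have hmax : arr.foldl (fun m row =>
        max m (PySem.List.len (PySem.List.slice (sortLineB row) none (some 100)))) 0
      = PySem.List.maxD
          ((arr.map (fun row => PySem.List.slice (sortLineB row) none (some 100))).map
            PySem.List.len) (fun x => x) 0 := by
    rw [maxD_eq_foldl]
    · rw [List.map_map, List.foldl_map]
      rfl
    · intro x hx
      rw [List.mem_map] at hx
      obtain ⟨r, _, rfl⟩ := hx
      rw [PySem.List.len_eq]
      positivity
  rw [hmax]
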